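-- pv_equiv track=rewrite | github.com/lizilong1993/shenji_agent | training/maps.py | infer_map_id_from_scenario_id
-- ===== SOURCE A (Python) =====
-- from typing import Dict, Iterable, List
--
-- def infer_map_id_from_scenario_id(scenario_id: str | int, map_ids: Iterable[int]) -> int | None:
--     value = str(scenario_id)
--     choices = sorted((str(map_id) for map_id in map_ids), key=len, reverse=True)
--     for candidate in choices:
--         if value.startswith(candidate) or value.endswith(candidate):
--             return int(candidate)
--     for candidate in choices:
--         if candidate in value:
--             return int(candidate)
--     return None
-- ===== SOURCE B (Python) =====
-- def infer_map_id_from_scenario_id(scenario_id, map_ids):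
--     value = str(scenario_id)
--     best = None
--     best_key = (0, 0)
--     for map_id in map_ids:
--         candidate = str(map_id)
--         if value.startswith(candidate) or value.endswith(candidate):
--             key = (2, len(candidate))
--         elif candidate in value:
--             key = (1, len(candidate))
--         else:
--             continue
--         if best is None or key > best_key:
--             best, best_key = candidate, key
--     return None if best is None else int(best)
-- ===== Notes on version B (the rewrite author's own statement) =====
-- stated objective: alternative
-- what changed: Replaces the length-descending sort plus two sequential scans (prefix/suffix pass, then substring pass) with a single unsorted pass that keeps a running best under the lexicographic key (match-priority, candidate length), updating only on a strictly greater key so the earliest candidate wins ties.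
import Mathlib
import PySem

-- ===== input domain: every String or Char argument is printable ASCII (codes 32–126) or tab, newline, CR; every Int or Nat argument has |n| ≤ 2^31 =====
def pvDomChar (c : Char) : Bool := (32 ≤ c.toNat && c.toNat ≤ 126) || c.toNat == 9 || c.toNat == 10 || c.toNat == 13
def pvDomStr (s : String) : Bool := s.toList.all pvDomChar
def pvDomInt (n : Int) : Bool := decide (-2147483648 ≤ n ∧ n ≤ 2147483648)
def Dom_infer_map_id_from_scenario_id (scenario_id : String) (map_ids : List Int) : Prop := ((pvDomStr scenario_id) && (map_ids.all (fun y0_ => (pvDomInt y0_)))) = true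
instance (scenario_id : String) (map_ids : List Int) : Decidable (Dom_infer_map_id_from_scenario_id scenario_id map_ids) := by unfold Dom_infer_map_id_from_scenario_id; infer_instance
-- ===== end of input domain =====

-- B replaces A's length-descending sort plus two sequential scans by a single unsorted pass
-- keeping a running best under the lexicographic key (match-priority, candidate length).


-- ===== PORT A =====
-- sorted((str(m) for m in map_ids), key=len, reverse=True); pass 1: startswith/endswith; pass 2: substring
def infer_map_id_from_scenario_id (scenario_id : String) (map_ids : List Int) : Option Int :=
  let value := scenario_id
  let choices := PySem.List.sorted (map_ids.map PySem.Int.toStr) PySem.Str.len true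
  match choices.find? (fun candidate => PySem.Str.startswith value candidate || PySem.Str.endswith value candidate) with
  | some candidate => PySem.Int.ofStr? candidate   -- return int(candidate): str of an int, always parses
  | none =>
    match choices.find? (fun candidate => PySem.Str.isIn candidate value) with
    | some candidate => PySem.Int.ofStr? candidate
    | none => none

-- ===== PORT B =====
-- the key computed in Source B's loop body: (2, len) for prefix/suffix, (1, len) for substring, none = continue
def pvKey (value candidate : String) : Option (Nat × Nat) :=
  if PySem.Str.startswith value candidate || PySem.Str.endswith value candidate then
    some (2, candidate.toList.length)
  else if PySem.Str.isIn candidate value then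
    some (1, candidate.toList.length)
  else
    none

-- one iteration of Source B's loop; Python's tuple '>' on (priority, length) is ported
-- by hand as the explicit lexicographic test (exact: both components are non-negative ints)
def pvStep (value : String) (best : Option (String × Nat × Nat)) (candidate : String) :
    Option (String × Nat × Nat) :=
  match pvKey value candidate with
  | none => best
  | some (p, n) =>
    match best with
    | none => some (candidate, p, n)
    | some (b, bp, bn) =>
      if bp < p ∨ (bp = p ∧ bn < n) then some (candidate, p, n) else some (b, bp, bn)

def infer_map_id_from_scenario_id_alt (scenario_id : String) (map_ids : List Int) : Option Int :=
  let value := scenario_id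
  match map_ids.foldl (fun best map_id => pvStep value best (PySem.Int.toStr map_id)) none with
  | none => none
  | some (best, _, _) => PySem.Int.ofStr? best   -- return int(best)

-- ===== PRECONDITION & SPEC =====
def Spec_infer_map_id_from_scenario_id (scenario_id : String) (map_ids : List Int) (out : Option Int) : Prop := out = infer_map_id_from_scenario_id_alt scenario_id map_ids
instance (scenario_id : String) (map_ids : List Int) (out : Option Int) : Decidable (Spec_infer_map_id_from_scenario_id scenario_id map_ids out) := by unfold Spec_infer_map_id_from_scenario_id; infer_instance

-- ===== CLAIM (what is proved, stated in full; the proofs are below) =====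
def Claim_equal_infer_map_id_from_scenario_id : Prop := ∀ (scenario_id : String) (map_ids : List Int), Dom_infer_map_id_from_scenario_id scenario_id map_ids → Spec_infer_map_id_from_scenario_id scenario_id map_ids (infer_map_id_from_scenario_id scenario_id map_ids)

-- ===== LEMMAS AND PROOFS =====

-- length-descending relation (A's sort order)
def pvDesc (a b : String) : Prop := PySem.Str.len b ≤ PySem.Str.len a

-- the maximal key among the matched candidates (none if nothing matches)
def pvMax (v : String) : List String → Option (Nat × Nat)
  | [] => none
  | c :: t =>
    match pvKey v c, pvMax v t with
    | none, m => m
    | some k, none => some k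
    | some k, some M => if M.1 < k.1 ∨ (M.1 = k.1 ∧ M.2 < k.2) then some k else some M

-- the first candidate whose key is M
def pvFind (v : String) (M : Nat × Nat) (l : List String) : Option String :=
  l.find? (fun c => decide (pvKey v c = some M))

-- the first candidate attaining the maximal key (the value both programs select)
def pvBest (v : String) (l : List String) : Option String :=
  match pvMax v l with
  | none => none
  | some M => pvFind v M l

-- B's fold state determined by the maximal key
def pvSel (v : String) (l : List String) : Option (Nat × Nat) → Option (String × Nat × Nat)
  | none => none
  | some M => (pvFind v M l).map (fun c => (c, M.1, M.2))

-- merging an accumulator with the best of the rest (same tie rule as pvStep)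
def pvComb (acc : Option (String × Nat × Nat)) : Option (String × Nat × Nat) → Option (String × Nat × Nat)
  | none => acc
  | some (x, p, n) =>
    match acc with
    | none => some (x, p, n)
    | some (b, bp, bn) => if bp < p ∨ (bp = p ∧ bn < n) then some (x, p, n) else some (b, bp, bn)

theorem pvMax_cons (v c : String) (t : List String) :
    pvMax v (c :: t) = match pvKey v c, pvMax v t with
      | none, m => m
      | some k, none => some k
      | some k, some M => if M.1 < k.1 ∨ (M.1 = k.1 ∧ M.2 < k.2) then some k else some M := rfl

theorem pv_key_len {v c : String} {j : Nat × Nat} (h : pvKey v c = some j) :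
    j.2 = c.toList.length := by
  unfold pvKey at h
  split_ifs at h <;> (cases h; rfl)

theorem pv_key_fst {v c : String} {j : Nat × Nat} (h : pvKey v c = some j) :
    j.1 = 1 ∨ j.1 = 2 := by
  unfold pvKey at h
  split_ifs at h <;> (cases h; simp)

theorem pv_max_none {v : String} : ∀ {l : List String}, pvMax v l = none →
    ∀ x ∈ l, pvKey v x = none := by
  intro l
  induction l with
  | nil => intro _ x hx; cases hx
  | cons c t ih =>
    intro h x hx
    unfold pvMax at h
    rcases hk : pvKey v c with _ | k <;> rcases hm : pvMax v t with _ | M <;>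
      rw [hk, hm] at h <;> simp only at h
    · rcases List.mem_cons.mp hx with rfl | hx'
      · exact hk
      · exact ih hm x hx'
    · exact absurd h (by simp)
    · exact absurd h (by simp)
    · split_ifs at h

theorem pv_max_none_of {v : String} : ∀ {l : List String},
    (∀ x ∈ l, pvKey v x = none) → pvMax v l = none := by
  intro l
  induction l with
  | nil => intro _; rfl
  | cons c t ih =>
    intro h
    unfold pvMax
    rw [h c List.mem_cons_self, ih (fun x hx => h x (List.mem_cons_of_mem _ hx))]

theorem pv_attain {v : String} : ∀ {l : List String} {M : Nat × Nat}, pvMax v l = some M →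
    ∃ x ∈ l, pvKey v x = some M := by
  intro l
  induction l with
  | nil => intro M h; cases h
  | cons c t ih =>
    intro M h
    unfold pvMax at h
    rcases hk : pvKey v c with _ | k <;> rcases hm : pvMax v t with _ | M' <;>
      rw [hk, hm] at h <;> simp only at h
    · cases h
    · exact (ih (by rw [hm, h])).elim (fun x hx => ⟨x, List.mem_cons_of_mem _ hx.1, hx.2⟩)
    · exact ⟨c, List.mem_cons_self, by rw [hk, h]⟩
    · split_ifs at h
      · exact ⟨c, List.mem_cons_self, by rw [hk, h]⟩
      · exact (ih (by rw [hm, h])).elim (fun x hx => ⟨x, List.mem_cons_of_mem _ hx.1, hx.2⟩)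

theorem pv_bound {v : String} : ∀ {l : List String} {M : Nat × Nat}, pvMax v l = some M →
    ∀ x ∈ l, ∀ j, pvKey v x = some j → ¬ (M.1 < j.1 ∨ (M.1 = j.1 ∧ M.2 < j.2)) := by
  intro l
  induction l with
  | nil => intro M _ x hx; cases hx
  | cons c t ih =>
    intro M h x hx j hj
    unfold pvMax at h
    rcases hk : pvKey v c with _ | k <;> rcases hm : pvMax v t with _ | M' <;>
      rw [hk, hm] at h <;> simp only at h
    · cases h
    · rcases List.mem_cons.mp hx with rfl | hx'
      · rw [hk] at hj; cases hj
      · exact ih (by rw [hm, h]) x hx' j hj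
    · rcases List.mem_cons.mp hx with rfl | hx'
      · rw [hk] at hj
        cases h; cases hj; omega
      · rw [pv_max_none hm x hx'] at hj; cases hj
    · rcases List.mem_cons.mp hx with rfl | hx'
      · rw [hk] at hj
        cases hj
        split_ifs at h with hc
        · cases h; omega
        · cases h; omega
      · have hb := ih hm x hx' j hj
        split_ifs at h with hc
        · cases h; omega
        · cases h; omega

theorem pv_max_eq {v : String} {l : List String} {M : Nat × Nat}
    (hex : ∃ x ∈ l, pvKey v x = some M)
    (hb : ∀ x ∈ l, ∀ j, pvKey v x = some j → ¬ (M.1 < j.1 ∨ (M.1 = j.1 ∧ M.2 < j.2))) :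
    pvMax v l = some M := by
  rcases hex with ⟨x, hx, hxk⟩
  rcases hm : pvMax v l with _ | M'
  · rw [pv_max_none hm x hx] at hxk; cases hxk
  · rcases pv_attain hm with ⟨y, hy, hyk⟩
    have h1 := pv_bound hm x hx M hxk
    have h2 := hb y hy M' hyk
    have : M = M' := by
      rcases M with ⟨a, b⟩; rcases M' with ⟨a', b'⟩
      simp only [Prod.mk.injEq]
      omega
    rw [this]

-- pvStep is pvComb with the single candidate's selection
theorem pv_step_comb (v : String) (acc : Option (String × Nat × Nat)) (c : String) :
    pvStep v acc c = pvComb acc (match pvKey v c with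
      | none => none
      | some k => some (c, k.1, k.2)) := by
  unfold pvStep pvComb
  rcases pvKey v c with _ | ⟨p, n⟩
  · rcases acc with _ | ⟨b, bp, bn⟩ <;> rfl
  · rcases acc with _ | ⟨b, bp, bn⟩ <;> rfl

-- B's fold with any accumulator merges it with the best of the list
theorem pv_fold_gen (v : String) : ∀ (l : List String) (acc : Option (String × Nat × Nat)),
    l.foldl (pvStep v) acc = pvComb acc (pvSel v l (pvMax v l)) := by
  intro l
  induction l with
  | nil => intro acc; rfl
  | cons c t ih =>
    intro acc
    rw [List.foldl_cons, ih (pvStep v acc c), pv_step_comb]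
    rcases hk : pvKey v c with _ | k
    · -- c does not match: it contributes nothing
      have hmax : pvMax v (c :: t) = pvMax v t := by
        rw [pvMax_cons, hk]
      have hfind : ∀ M, pvFind v M (c :: t) = pvFind v M t := by
        intro M; unfold pvFind; rw [List.find?_cons_of_neg (by simp [hk])]
      rw [hmax]
      rcases hm : pvMax v t with _ | M
      · rfl
      · show pvComb (pvComb acc none) (pvSel v t (some M)) = pvComb acc (pvSel v (c :: t) (some M))
        unfold pvSel
        dsimp only
        rw [hfind M]
        rcases acc with _ | ⟨b, bp, bn⟩ <;> rfl
    · -- c matches with key k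
      have hmax : pvMax v (c :: t) = match pvMax v t with
          | none => some k
          | some M => if M.1 < k.1 ∨ (M.1 = k.1 ∧ M.2 < k.2) then some k else some M := by
        rw [pvMax_cons, hk]
        rcases pvMax v t with _ | M' <;> rfl
      rcases hm : pvMax v t with _ | M
      · -- nothing matches in t
        rw [hm] at hmax
        dsimp only at hmax
        have hfind : pvFind v k (c :: t) = some c := by
          unfold pvFind; exact List.find?_cons_of_pos (by simp [hk])
        rw [hmax]
        unfold pvSel
        dsimp only
        rw [hfind]
        rcases acc with _ | ⟨b, bp, bn⟩ <;> rfl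
      · rcases pv_attain hm with ⟨x0, hx0, hx0k⟩
        have hy0' : ∃ y0, pvFind v M t = some y0 :=
          Option.isSome_iff_exists.mp (List.find?_isSome.mpr ⟨x0, hx0, by simp [hx0k]⟩)
        rcases hy0' with ⟨y0, hy0⟩
        rw [hm] at hmax
        dsimp only at hmax
        by_cases hlt : M.1 < k.1 ∨ (M.1 = k.1 ∧ M.2 < k.2)
        · -- c strictly improves on the best of t
          rw [if_pos hlt] at hmax
          have hfind : pvFind v k (c :: t) = some c := by
            unfold pvFind; exact List.find?_cons_of_pos (by simp [hk])
          rw [hmax]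
          unfold pvSel
          dsimp only
          rw [hy0, hfind]
          simp only [Option.map_some]
          rcases M with ⟨mp, mn⟩; rcases k with ⟨p, n⟩
          dsimp only at hlt
          rcases acc with _ | ⟨b, bp, bn⟩
          · unfold pvComb
            dsimp only
            rw [if_neg (by omega)]
          · unfold pvComb
            dsimp only
            split_ifs <;> dsimp only <;> (try split_ifs) <;> first | rfl | omega
        · rw [if_neg hlt] at hmax
          by_cases hke : k = M
          · -- tie: c comes first and wins
            have hfind : pvFind v M (c :: t) = some c := by
              unfold pvFind; exact List.find?_cons_of_pos (by simp [hk, hke])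
            rw [hmax]
            unfold pvSel
            dsimp only
            rw [hy0, hfind]
            simp only [Option.map_some]
            subst hke
            rcases k with ⟨p, n⟩
            rcases acc with _ | ⟨b, bp, bn⟩
            · unfold pvComb
              dsimp only
              rw [if_neg (by omega)]
            · unfold pvComb
              dsimp only
              split_ifs <;> dsimp only <;> (try split_ifs) <;> first | rfl | omega
          · -- the best of t is strictly better than c
            have hklt : k.1 < M.1 ∨ (k.1 = M.1 ∧ k.2 < M.2) := by
              rcases M with ⟨mp, mn⟩; rcases k with ⟨p, n⟩
              simp only [Prod.mk.injEq] at hke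
              simp only at hlt ⊢
              omega
            have hfind : pvFind v M (c :: t) = pvFind v M t := by
              unfold pvFind
              exact List.find?_cons_of_neg (by simp [hk, hke])
            rw [hmax]
            unfold pvSel
            dsimp only
            rw [hfind, hy0]
            simp only [Option.map_some]
            rcases M with ⟨mp, mn⟩; rcases k with ⟨p, n⟩
            dsimp only at hklt
            rcases acc with _ | ⟨b, bp, bn⟩
            · unfold pvComb
              dsimp only
              rw [if_pos (by omega)]
            · unfold pvComb
              dsimp only
              split_ifs <;> dsimp only <;> (try split_ifs) <;> first | rfl | omega

-- B's fold computes the first candidate attaining the maximal key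
theorem pv_fold_eq (v : String) (l : List String) :
    l.foldl (pvStep v) none = pvSel v l (pvMax v l) := by
  rw [pv_fold_gen]
  rcases pvSel v l (pvMax v l) with _ | ⟨x, p, n⟩ <;> rfl

-- a candidate failing the prefix/suffix test has priority at most 1
theorem pv_key_not2 {v x : String}
    (h : (PySem.Str.startswith v x || PySem.Str.endswith v x) = false) :
    pvKey v x = none ∨ pvKey v x = some (1, x.toList.length) := by
  unfold pvKey
  rw [if_neg (by rw [h]; simp)]
  split_ifs <;> simp

theorem pv_len_le_of_desc {a b : String} (h : pvDesc a b) : b.toList.length ≤ a.toList.length := by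
  have h' := h; unfold pvDesc at h'
  rw [PySem.Str.len_eq, PySem.Str.len_eq] at h'
  exact_mod_cast h'

theorem pvBest_of_max {v : String} {l : List String} {M : Nat × Nat}
    (hmax : pvMax v l = some M) : pvBest v l = pvFind v M l := by
  unfold pvBest; rw [hmax]

-- A's two passes over a length-descending list compute pvBest
theorem pv_passes_eq (v : String) : ∀ (l : List String), l.Pairwise pvDesc →
    (match l.find? (fun c => PySem.Str.startswith v c || PySem.Str.endswith v c) with
     | some c => some c
     | none => l.find? (fun c => PySem.Str.isIn c v)) = pvBest v l := by
  intro l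
  induction l with
  | nil => intro _; rfl
  | cons c t ih =>
    intro h
    have hd := (List.pairwise_cons.mp h).1
    have ht := (List.pairwise_cons.mp h).2
    by_cases h2 : (PySem.Str.startswith v c || PySem.Str.endswith v c) = true
    · -- the head is a prefix/suffix match: it has the maximal key and comes first
      have hk : pvKey v c = some (2, c.toList.length) := by
        unfold pvKey; rw [if_pos h2]
      have hb : ∀ x ∈ c :: t, ∀ j, pvKey v x = some j →
          ¬ ((2, c.toList.length).1 < j.1 ∨ ((2, c.toList.length).1 = j.1 ∧ (2, c.toList.length).2 < j.2)) := by
        intro x hx j hj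
        rcases List.mem_cons.mp hx with rfl | hx'
        · rw [hk] at hj; cases hj; dsimp only; omega
        · have hf := pv_key_fst hj
          have hl := pv_key_len hj
          have hle := pv_len_le_of_desc (hd x hx')
          dsimp only
          omega
      have hmax := pv_max_eq ⟨c, List.mem_cons_self, hk⟩ hb
      have hfc : List.find? (fun c' => PySem.Str.startswith v c' || PySem.Str.endswith v c') (c :: t) = some c :=
        List.find?_cons_of_pos h2
      have hff : List.find? (fun c' => decide (pvKey v c' = some (2, c.toList.length))) (c :: t) = some c :=
        List.find?_cons_of_pos (by simp [hk])
      rw [hfc, pvBest_of_max hmax]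
      unfold pvFind
      rw [hff]
    · have hP2 : (PySem.Str.startswith v c || PySem.Str.endswith v c) = false :=
        Bool.eq_false_iff.mpr h2
      have hfc : List.find? (fun c' => PySem.Str.startswith v c' || PySem.Str.endswith v c') (c :: t) =
          List.find? (fun c' => PySem.Str.startswith v c' || PySem.Str.endswith v c') t :=
        List.find?_cons_of_neg (by rw [hP2]; simp)
      rw [hfc]
      by_cases h1 : PySem.Str.isIn c v = true
      · -- the head matches as a substring only
        have hk : pvKey v c = some (1, c.toList.length) := by
          unfold pvKey; rw [if_neg (by rw [hP2]; simp), if_pos h1]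
        rcases hf2 : t.find? (fun c' => PySem.Str.startswith v c' || PySem.Str.endswith v c') with _ | d
        · -- no prefix/suffix match anywhere: the head wins with key (1, len c)
          have hno2 := List.find?_eq_none.mp hf2
          have hb : ∀ x ∈ c :: t, ∀ j, pvKey v x = some j →
              ¬ ((1, c.toList.length).1 < j.1 ∨ ((1, c.toList.length).1 = j.1 ∧ (1, c.toList.length).2 < j.2)) := by
            intro x hx j hj
            rcases List.mem_cons.mp hx with rfl | hx'
            · rw [hk] at hj; cases hj; dsimp only; omega
            · have hle := pv_len_le_of_desc (hd x hx')
              have hl := pv_key_len hj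
              rcases pv_key_not2 (Bool.eq_false_iff.mpr (hno2 x hx')) with hn | hs
              · rw [hn] at hj; cases hj
              · rw [hs] at hj; cases hj; dsimp only; omega
          have hmax := pv_max_eq ⟨c, List.mem_cons_self, hk⟩ hb
          have hfc1 : List.find? (fun c' => PySem.Str.isIn c' v) (c :: t) = some c :=
            List.find?_cons_of_pos h1
          have hff : List.find? (fun c' => decide (pvKey v c' = some (1, c.toList.length))) (c :: t) = some c :=
            List.find?_cons_of_pos (by simp [hk])
          dsimp only
          rw [hfc1, pvBest_of_max hmax]
          unfold pvFind
          rw [hff]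
        · -- d is the first prefix/suffix match: it has the maximal key
          rcases List.find?_eq_some_iff_append.mp hf2 with ⟨hd2, as, bs, hsplit, has⟩
          have hkd : pvKey v d = some (2, d.toList.length) := by
            unfold pvKey; rw [if_pos hd2]
          have hpt : (as ++ d :: bs).Pairwise pvDesc := hsplit ▸ ht
          have hdbs : ∀ x ∈ bs, pvDesc d x :=
            (List.pairwise_cons.mp (List.pairwise_append.mp hpt).2.1).1
          have hb : ∀ x ∈ c :: t, ∀ j, pvKey v x = some j →
              ¬ ((2, d.toList.length).1 < j.1 ∨ ((2, d.toList.length).1 = j.1 ∧ (2, d.toList.length).2 < j.2)) := by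
            intro x hx j hj
            rcases List.mem_cons.mp hx with rfl | hx'
            · rw [hk] at hj; cases hj; dsimp only; omega
            · rw [hsplit] at hx'
              rcases List.mem_append.mp hx' with hxa | hxdb
              · rcases pv_key_not2 (by simpa using has x hxa) with hn | hs
                · rw [hn] at hj; cases hj
                · rw [hs] at hj; cases hj; dsimp only; omega
              · rcases List.mem_cons.mp hxdb with rfl | hxb
                · rw [hkd] at hj; cases hj; dsimp only; omega
                · have hle := pv_len_le_of_desc (hdbs x hxb)
                  have hf := pv_key_fst hj
                  have hl := pv_key_len hj
                  dsimp only
                  omega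
          have hmem : d ∈ c :: t :=
            List.mem_cons_of_mem _ (by rw [hsplit]; exact List.mem_append_right _ List.mem_cons_self)
          have hmax := pv_max_eq ⟨d, hmem, hkd⟩ hb
          have hffc : List.find? (fun c' => decide (pvKey v c' = some (2, d.toList.length))) (c :: t) =
              List.find? (fun c' => decide (pvKey v c' = some (2, d.toList.length))) t :=
            List.find?_cons_of_neg (by simp [hk])
          have hasnone : as.find? (fun c' => decide (pvKey v c' = some (2, d.toList.length))) = none := by
            rw [List.find?_eq_none]
            intro x hx
            rcases pv_key_not2 (by simpa using has x hx) with hn | hs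
            · simp [hn]
            · simp [hs]
          have hffd : List.find? (fun c' => decide (pvKey v c' = some (2, d.toList.length))) (d :: bs) = some d :=
            List.find?_cons_of_pos (by simp [hkd])
          dsimp only
          rw [pvBest_of_max hmax]
          unfold pvFind
          rw [hffc, hsplit, List.find?_append, hasnone, hffd]
          rfl
      · -- the head does not match at all
        have hk : pvKey v c = none := by
          unfold pvKey
          rw [if_neg (by rw [hP2]; simp), if_neg (by rw [Bool.eq_false_iff.mpr h1]; simp)]
        have hmaxc : pvMax v (c :: t) = pvMax v t := by rw [pvMax_cons, hk]
        have hfindc : ∀ M, pvFind v M (c :: t) = pvFind v M t := by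
          intro M; unfold pvFind; exact List.find?_cons_of_neg (by simp [hk])
        have hfc1 : List.find? (fun c' => PySem.Str.isIn c' v) (c :: t) =
            List.find? (fun c' => PySem.Str.isIn c' v) t :=
          List.find?_cons_of_neg (by rw [Bool.eq_false_iff.mpr h1]; simp)
        rw [hfc1, ih ht]
        unfold pvBest
        rw [hmaxc]
        rcases pvMax v t with _ | M
        · rfl
        · exact (hfindc M).symm

-- find? is the head of the filtered list
theorem pv_find?_eq_head?_filter {α : Type} (p : α → Bool) : ∀ l : List α,
    l.find? p = (l.filter p).head? := by
  intro l
  induction l with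
  | nil => rfl
  | cons c t ih =>
    by_cases hc : p c = true
    · rw [List.find?_cons_of_pos hc, List.filter_cons_of_pos hc, List.head?_cons]
    · rw [List.find?_cons_of_neg hc, List.filter_cons_of_neg (by simpa using hc), ih]

theorem pv_insertBy_cons (bef : String → String → Bool) (x y : String) (ys : List String) :
    PySem.List.insertBy bef x (y :: ys) =
      if bef x y then x :: y :: ys else y :: PySem.List.insertBy bef x ys := by
  simp [PySem.List.insertBy]

-- inserting into a length-descending list keeps it length-descending
theorem pv_insertBy_pairwise {x : String} {ys : List String}
    (h : ys.Pairwise pvDesc) :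
    (PySem.List.insertBy (fun a b => decide (PySem.Str.len b < PySem.Str.len a)) x ys).Pairwise pvDesc := by
  induction ys with
  | nil => simp [PySem.List.insertBy]
  | cons y ys ih =>
    rw [pv_insertBy_cons]
    by_cases hxy : (decide (PySem.Str.len y < PySem.Str.len x) : Bool) = true
    · rw [if_pos hxy]
      simp only [decide_eq_true_eq] at hxy
      refine List.pairwise_cons.mpr ⟨?_, h⟩
      intro z hz
      rcases List.mem_cons.mp hz with rfl | hz'
      · exact le_of_lt hxy
      · have := (List.pairwise_cons.mp h).1 z hz'
        unfold pvDesc at this ⊢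
        omega
    · rw [if_neg hxy]
      simp only [decide_eq_true_eq] at hxy
      refine List.pairwise_cons.mpr ⟨?_, ih (List.pairwise_cons.mp h).2⟩
      intro z hz
      rcases (PySem.List.mem_insertBy _ _ _ _).mp hz with rfl | hz'
      · unfold pvDesc; omega
      · exact (List.pairwise_cons.mp h).1 z hz'

-- a candidate of the common filtered length is inserted AFTER all filtered candidates
theorem pv_insertBy_filter_pos {p : String → Bool} {x : String} {ys : List String}
    (hp : ∀ a b, p a = true → p b = true → a.toList.length = b.toList.length)
    (hx : p x = true) (h : ys.Pairwise pvDesc) :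
    (PySem.List.insertBy (fun a b => decide (PySem.Str.len b < PySem.Str.len a)) x ys).filter p =
      ys.filter p ++ [x] := by
  induction ys with
  | nil => simp [PySem.List.insertBy, hx]
  | cons y ys ih =>
    rw [pv_insertBy_cons]
    by_cases hxy : (decide (PySem.Str.len y < PySem.Str.len x) : Bool) = true
    · rw [if_pos hxy]
      simp only [decide_eq_true_eq] at hxy
      have hnil : (y :: ys).filter p = [] := by
        rw [List.filter_eq_nil_iff]
        intro z hz hpz
        have hlen : z.toList.length = x.toList.length := hp z x hpz hx
        have hzy : PySem.Str.len z ≤ PySem.Str.len y := by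
          rcases List.mem_cons.mp hz with rfl | hz'
          · exact le_refl _
          · exact (List.pairwise_cons.mp h).1 z hz'
        rw [PySem.Str.len_eq, PySem.Str.len_eq] at hzy hxy
        omega
      rw [List.filter_cons_of_pos hx, hnil]
      rfl
    · rw [if_neg hxy]
      by_cases hy : p y = true
      · rw [List.filter_cons_of_pos hy, List.filter_cons_of_pos hy, ih (List.pairwise_cons.mp h).2]
        rfl
      · rw [List.filter_cons_of_neg (by simpa using hy), List.filter_cons_of_neg (by simpa using hy),
          ih (List.pairwise_cons.mp h).2]

-- inserting a non-selected candidate leaves the filtered list unchanged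
theorem pv_insertBy_filter_neg {p : String → Bool} {x : String} {ys : List String}
    (hx : p x = false) :
    (PySem.List.insertBy (fun a b => decide (PySem.Str.len b < PySem.Str.len a)) x ys).filter p =
      ys.filter p := by
  induction ys with
  | nil => simp [PySem.List.insertBy, hx]
  | cons y ys ih =>
    rw [pv_insertBy_cons]
    by_cases hxy : (decide (PySem.Str.len y < PySem.Str.len x) : Bool) = true
    · rw [if_pos hxy, List.filter_cons_of_neg (by simp [hx])]
    · rw [if_neg hxy]
      by_cases hy : p y = true
      · rw [List.filter_cons_of_pos hy, List.filter_cons_of_pos hy, ih]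
      · rw [List.filter_cons_of_neg (by simpa using hy), List.filter_cons_of_neg (by simpa using hy), ih]

-- the insertion-sort fold is stable on any fixed-length selection
theorem pv_foldl_insert_filter {p : String → Bool}
    (hp : ∀ a b, p a = true → p b = true → a.toList.length = b.toList.length) :
    ∀ (xs acc : List String), acc.Pairwise pvDesc →
    ((xs.foldl (fun acc x =>
        PySem.List.insertBy (fun a b => decide (PySem.Str.len b < PySem.Str.len a)) x acc) acc).filter p =
      acc.filter p ++ xs.filter p) := by
  intro xs
  induction xs with
  | nil => intro acc _; simp
  | cons x xs ih =>
    intro acc hacc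
    rw [List.foldl_cons]
    rw [ih _ (pv_insertBy_pairwise hacc)]
    by_cases hx : p x = true
    · rw [pv_insertBy_filter_pos hp hx hacc, List.filter_cons_of_pos hx]
      simp
    · rw [pv_insertBy_filter_neg (by simpa using hx), List.filter_cons_of_neg (by simpa using hx)]

-- A's stable sort does not change the filtered sublist of a fixed-length selection
theorem pv_sorted_filter {p : String → Bool}
    (hp : ∀ a b, p a = true → p b = true → a.toList.length = b.toList.length) (l : List String) :
    (PySem.List.sorted l PySem.Str.len true).filter p = l.filter p := by
  rw [PySem.List.sorted_rev_eq_foldl_insertBy]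
  have := pv_foldl_insert_filter hp l [] List.Pairwise.nil
  simpa using this

-- pvMax only depends on which candidates occur
theorem pv_max_congr {v : String} {l l' : List String}
    (hmem : ∀ x, x ∈ l ↔ x ∈ l') : pvMax v l = pvMax v l' := by
  rcases hm : pvMax v l' with _ | M
  · exact pv_max_none_of (fun x hx => pv_max_none hm x ((hmem x).mp hx))
  · rcases pv_attain hm with ⟨x, hx, hxk⟩
    exact pv_max_eq ⟨x, (hmem x).mpr hx, hxk⟩
      (fun y hy j hj => pv_bound hm y ((hmem y).mp hy) j hj)

-- pvBest is invariant under A's stable length-descending sort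
theorem pv_best_sorted (v : String) (l : List String) :
    pvBest v (PySem.List.sorted l PySem.Str.len true) = pvBest v l := by
  have hperm := PySem.List.sorted_perm l PySem.Str.len true
  have hmem : ∀ x, x ∈ PySem.List.sorted l PySem.Str.len true ↔ x ∈ l :=
    fun x => hperm.mem_iff
  have hmax := pv_max_congr (v := v) hmem
  rcases hm : pvMax v l with _ | M
  · unfold pvBest
    rw [hm, hmax.trans hm]
  · rw [pvBest_of_max (hmax.trans hm), pvBest_of_max hm]
    unfold pvFind
    rw [pv_find?_eq_head?_filter, pv_find?_eq_head?_filter]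
    rw [pv_sorted_filter (fun a b ha hb => by
      have ha' := pv_key_len (of_decide_eq_true ha)
      have hb' := pv_key_len (of_decide_eq_true hb)
      omega)]

-- ===== VERDICT (by name: the statement is the Claim_ definition above) =====
theorem infer_map_id_from_scenario_id_spec : Claim_equal_infer_map_id_from_scenario_id := by
  intro v ids _
  unfold Spec_infer_map_id_from_scenario_id
  unfold infer_map_id_from_scenario_id infer_map_id_from_scenario_id_alt
  dsimp only
  rw [← List.foldl_map (f := PySem.Int.toStr) (g := pvStep v), pv_fold_eq]
  have hpass := pv_passes_eq v (PySem.List.sorted (ids.map PySem.Int.toStr) PySem.Str.len true)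
    (PySem.List.sorted_pairwise_rev (ids.map PySem.Int.toStr) PySem.Str.len)
  rw [pv_best_sorted] at hpass
  rcases hm : pvMax v (ids.map PySem.Int.toStr) with _ | M
  · unfold pvBest at hpass
    rw [hm] at hpass
    rcases hf2 : (PySem.List.sorted (ids.map PySem.Int.toStr) PySem.Str.len true).find?
        (fun candidate => PySem.Str.startswith v candidate || PySem.Str.endswith v candidate) with _ | c
    · rw [hf2] at hpass
      dsimp only at hpass
      rw [hpass]
      rfl
    · rw [hf2] at hpass
      dsimp only at hpass
      cases hpass
  · rw [pvBest_of_max hm] at hpass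
    unfold pvSel
    dsimp only
    rcases hff : pvFind v M (ids.map PySem.Int.toStr) with _ | c
    · rw [hff] at hpass
      rcases hf2 : (PySem.List.sorted (ids.map PySem.Int.toStr) PySem.Str.len true).find?
          (fun candidate => PySem.Str.startswith v candidate || PySem.Str.endswith v candidate) with _ | d
      · rw [hf2] at hpass
        dsimp only at hpass
        rw [hpass]
        rfl
      · rw [hf2] at hpass
        dsimp only at hpass
        cases hpass
    · rw [hff] at hpass
      simp only [Option.map_some]
      rcases hf2 : (PySem.List.sorted (ids.map PySem.Int.toStr) PySem.Str.len true).find?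
          (fun candidate => PySem.Str.startswith v candidate || PySem.Str.endswith v candidate) with _ | d
      · rw [hf2] at hpass
        dsimp only at hpass
        rw [hpass]
      · rw [hf2] at hpass
        dsimp only at hpass
        rw [Option.some.inj hpass]
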